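-- pv_equiv track=rewrite | github.com/syntomic/interview | code/numPermsDISequence.py | numPermsDISequence
-- ===== SOURCE A (Python) =====
-- def numPermsDISequence(S):
--     """
--     :type S: str
--     :rtype: int
--     """
--     dp = [1] * (len(S) + 1)
--     for c in S:
--         if c == "I":
--             dp = dp[:-1]
--             for i in range(1, len(dp)):
--                 dp[i] += dp[i - 1]
--         else:
--             dp = dp[1:]
--             for i in range(len(dp) - 1)[::-1]:
--                 dp[i] += dp[i + 1]
--     return dp[0] % (10**9 + 7)
-- ===== SOURCE B (Python) =====
-- def numPermsDISequence(S):
--     """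
--     :type S: str
--     :rtype: int
--     """
--     # Editorial-style 2-D DP over suffixes, scanning S right to left:
--     # row[j] = number of valid relative arrangements of the already-processed
--     # suffix whose first element is the j-th smallest of the values it uses.
--     row = [1]
--     for c in reversed(S):
--         if c == "I":
--             tmp = []
--             acc = 0
--             for x in reversed(row):
--                 acc += x
--                 tmp.append(acc)
--             row = tmp[::-1] + [0]
--         else:
--             new = [0]
--             acc = 0
--             for x in row:
--                 acc += x
--                 new.append(acc)
--             row = new
--     return sum(row) % (10**9 + 7)
-- ===== Notes on version B (the rewrite author's own statement) =====
-- stated objective: alternative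
-- what changed: B replaces A's shrinking in-place vector (prefix/suffix sums overwritten in the same list, answer dp[0]) by the editorial growing-row DP over suffixes: scanning S right-to-left it builds a fresh row of length k+1 where row[j] counts valid arrangements of the processed suffix starting with the j-th smallest used value, and returns sum(row) % (10**9+7).
import Mathlib
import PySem

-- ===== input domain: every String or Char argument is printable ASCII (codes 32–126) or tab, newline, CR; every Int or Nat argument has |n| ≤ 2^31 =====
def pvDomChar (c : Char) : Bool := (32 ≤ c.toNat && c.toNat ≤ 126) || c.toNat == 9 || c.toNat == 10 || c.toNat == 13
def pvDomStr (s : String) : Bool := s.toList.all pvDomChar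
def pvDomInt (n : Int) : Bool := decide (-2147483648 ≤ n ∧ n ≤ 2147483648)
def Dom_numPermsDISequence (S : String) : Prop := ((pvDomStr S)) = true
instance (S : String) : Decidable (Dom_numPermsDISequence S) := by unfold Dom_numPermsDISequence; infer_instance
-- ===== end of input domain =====

-- B replaces A's shrinking in-place vector (answer dp[0]) by the editorial growing-row
-- DP over suffixes of S read right-to-left, returning sum(row) % (10**9+7); alternative
-- decomposition, same O(n^2) cost, return value proved identical.

-- ===== PORT A =====
-- 'for i in range(1, len(dp)): dp[i] += dp[i-1]' — structural recursion over the list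
-- carrying the loop's only live state, the previously written cell dp[i-1] (= prev);
-- same additions in the same order; exact.
def pvPrefixLoop : Int → List Int → List Int
  | _, [] => []
  | prev, x :: xs => (prev + x) :: pvPrefixLoop (prev + x) xs

-- 'for i in range(len(dp)-1)[::-1]: dp[i] += dp[i+1]' — recursion reaching the right end
-- first, then adding the already-updated right neighbour (head of the recursive result);
-- same additions in the same order; exact.
def pvSuffixLoop : List Int → List Int
  | [] => []
  | x :: xs => (x + (pvSuffixLoop xs).headD 0) :: pvSuffixLoop xs

def numPermsDISequence (S : String) : Int :=
  -- dp = [1] * (len(S) + 1)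
  let dp0 : List Int := List.replicate (S.toList.length + 1) 1
  let dp := S.toList.foldl (fun dp c =>
    if c = 'I' then
      pvPrefixLoop 0 (PySem.List.slice dp none (some (-1)))   -- dp = dp[:-1]; forward loop (i=0 cell is untouched: prev starts at 0)
    else
      pvSuffixLoop (PySem.List.slice dp (some 1) none)) dp0   -- dp = dp[1:]; backward loop
  PySem.Int.mod (PySem.List.pyGetD dp 0 0) (10 ^ 9 + 7)        -- dp[0] % (10**9+7); dp is always nonempty

-- ===== PORT B =====
-- the body of B's 'for c in reversed(S)' loop
def pvAltStep (row : List Int) (c : Char) : List Int :=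
  if c = 'I' then
    -- tmp = []; acc = 0; for x in reversed(row): acc += x; tmp.append(acc); row = tmp[::-1] + [0]
    let t := row.reverse.foldl (fun (p : Int × List Int) x => (p.1 + x, p.2 ++ [p.1 + x])) (0, [])
    t.2.reverse ++ [0]
  else
    -- new = [0]; acc = 0; for x in row: acc += x; new.append(acc); row = new
    let t := row.foldl (fun (p : Int × List Int) x => (p.1 + x, p.2 ++ [p.1 + x])) (0, [(0 : Int)])
    t.2

def numPermsDISequence_alt (S : String) : Int :=
  let row0 : List Int := [1]
  let row := S.toList.reverse.foldl pvAltStep row0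
  PySem.Int.mod row.sum (10 ^ 9 + 7)

-- ===== PRECONDITION & SPEC =====
def Spec_numPermsDISequence (S : String) (out : Int) : Prop := out = numPermsDISequence_alt S
instance (S : String) (out : Int) : Decidable (Spec_numPermsDISequence S out) := by unfold Spec_numPermsDISequence; infer_instance

-- ===== CLAIM (what is proved, stated in full; the proofs are below) =====
def Claim_equal_numPermsDISequence : Prop := ∀ (S : String), Dom_numPermsDISequence S → Spec_numPermsDISequence S (numPermsDISequence S)

-- ===== LEMMAS AND PROOFS =====

-- dot product, truncating at the shorter list
def pvDot : List Int → List Int → Int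
  | [], _ => 0
  | _, [] => 0
  | x :: xs, y :: ys => x * y + pvDot xs ys

-- B's row, written as a foldr (B's foldl over the reversed string)
def pvWrow (l : List Char) : List Int :=
  l.foldr (fun c r =>
    if c = 'I' then (pvPrefixLoop 0 r.reverse).reverse ++ [0] else 0 :: pvPrefixLoop 0 r) [1]

theorem pvPrefixLoop_length (a : Int) (l : List Int) :
    (pvPrefixLoop a l).length = l.length := by
  induction l generalizing a with
  | nil => rfl
  | cons x xs ih => simp [pvPrefixLoop, ih]

theorem pvSuffixLoop_length (l : List Int) :
    (pvSuffixLoop l).length = l.length := by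
  induction l with
  | nil => rfl
  | cons x xs ih => simp [pvSuffixLoop, ih]

theorem pvSuffixLoop_cons : ∀ (x : Int) (xs : List Int),
    pvSuffixLoop (x :: xs) = (x + xs.sum) :: pvSuffixLoop xs
  | x, [] => by simp [pvSuffixLoop]
  | x, y :: ys => by
    have h1 : pvSuffixLoop (x :: y :: ys)
        = (x + (pvSuffixLoop (y :: ys)).headD 0) :: pvSuffixLoop (y :: ys) := rfl
    rw [h1, pvSuffixLoop_cons y ys]
    simp

theorem pvPrefixLoop_shift (a b : Int) (l : List Int) :
    pvPrefixLoop (a + b) l = (pvPrefixLoop b l).map (a + ·) := by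
  induction l generalizing b with
  | nil => rfl
  | cons x xs ih =>
    simp [pvPrefixLoop]
    constructor
    · ring
    · rw [← ih (b + x)]; ring_nf

theorem pvPrefixLoop_eq_map (a : Int) (l : List Int) :
    pvPrefixLoop a l = (pvPrefixLoop 0 l).map (a + ·) := by
  have := pvPrefixLoop_shift a 0 l
  simpa using this

theorem pvPrefixLoop_append_singleton (a : Int) (l : List Int) (y : Int) :
    pvPrefixLoop a (l ++ [y]) = pvPrefixLoop a l ++ [a + l.sum + y] := by
  induction l generalizing a with
  | nil => simp [pvPrefixLoop]
  | cons x xs ih => simp [pvPrefixLoop, ih]; ring_nf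

-- reversed prefix sums of the reversed list = suffix sums
theorem pvRevPref (u : List Int) :
    (pvPrefixLoop 0 u.reverse).reverse = pvSuffixLoop u := by
  induction u with
  | nil => rfl
  | cons x xs ih =>
    rw [pvSuffixLoop_cons, List.reverse_cons, pvPrefixLoop_append_singleton]
    simp [ih]; ring

theorem pvDot_nil_right (xs : List Int) : pvDot xs [] = 0 := by
  cases xs <;> rfl

theorem pvDot_map_add_right (xs p : List Int) (y : Int) (h : p.length = xs.length) :
    pvDot xs (p.map (y + ·)) = pvDot xs p + xs.sum * y := by
  induction xs generalizing p with
  | nil => simp [pvDot]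
  | cons x t ih =>
    cases p with
    | nil => simp at h
    | cons q qs =>
      simp only [List.length_cons, Nat.succ_inj] at h
      simp only [List.map_cons, pvDot, ih qs h, List.sum_cons]
      ring

theorem pvDot_map_add_left (xs p : List Int) (y : Int) (h : p.length = xs.length) :
    pvDot (p.map (y + ·)) xs = pvDot p xs + xs.sum * y := by
  induction xs generalizing p with
  | nil => simp [pvDot_nil_right]
  | cons x t ih =>
    cases p with
    | nil => simp at h
    | cons q qs =>
      simp only [List.length_cons, Nat.succ_inj] at h
      simp only [List.map_cons, pvDot, ih qs h, List.sum_cons]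
      ring

-- K1: ⟨suffix-sums u ++ [0], v⟩ = ⟨u, prefix-sums (v.dropLast)⟩
theorem pvK1 (u v : List Int) (h : v.length = u.length + 1) :
    pvDot (pvSuffixLoop u ++ [0]) v = pvDot u (pvPrefixLoop 0 v.dropLast) := by
  induction u generalizing v with
  | nil =>
    cases v with
    | nil => simp at h
    | cons y ys =>
      simp only [List.length_cons, List.length_nil, Nat.succ_inj] at h
      have : ys = [] := List.eq_nil_of_length_eq_zero h
      subst this
      simp [pvSuffixLoop, pvDot]
  | cons x xs ih =>
    cases v with
    | nil => simp at h
    | cons y ys =>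
      simp only [List.length_cons, Nat.succ_inj] at h
      have hys : ys ≠ [] := by intro hn; subst hn; simp at h
      obtain ⟨d, z, hd⟩ := ys.eq_nil_or_concat.resolve_left hys
      have hdl : (y :: ys).dropLast = y :: ys.dropLast := by
        cases ys with
        | nil => exact absurd rfl hys
        | cons a b => simp
      rw [pvSuffixLoop_cons, hdl]
      have hlen : ys.dropLast.length = xs.length := by
        simp [List.length_dropLast, h]
      have hpre : pvPrefixLoop 0 (y :: ys.dropLast) = y :: pvPrefixLoop y ys.dropLast := by
        simp [pvPrefixLoop]
      rw [hpre]
      simp only [List.cons_append, pvDot]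
      rw [ih ys h, pvPrefixLoop_eq_map y ys.dropLast,
          pvDot_map_add_right xs _ y (by simp [pvPrefixLoop_length, hlen])]
      ring

-- K2: ⟨0 :: prefix-sums u, v⟩ = ⟨u, suffix-sums (v.tail)⟩
theorem pvK2 (u v : List Int) (h : v.length = u.length + 1) :
    pvDot (0 :: pvPrefixLoop 0 u) v = pvDot u (pvSuffixLoop v.tail) := by
  induction u generalizing v with
  | nil =>
    cases v with
    | nil => simp at h
    | cons y ys => simp [pvDot, pvPrefixLoop]
  | cons x xs ih =>
    cases v with
    | nil => simp at h
    | cons y ys =>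
      simp only [List.length_cons, Nat.succ_inj] at h
      cases ys with
      | nil => simp at h
      | cons z zs =>
        simp only [List.length_cons, Nat.succ_inj] at h
        have hIH := ih (y :: zs) (by simpa using h)
        -- hIH : pvDot (0 :: pvPrefixLoop 0 xs) (y :: zs) = pvDot xs (pvSuffixLoop zs)
        simp only [pvDot, List.tail_cons] at hIH ⊢
        rw [pvSuffixLoop_cons]
        simp only [pvDot]
        have hpre : pvPrefixLoop 0 (x :: xs) = x :: pvPrefixLoop x xs := by
          simp [pvPrefixLoop]
        rw [hpre]
        simp only [pvDot]
        rw [pvPrefixLoop_eq_map x xs,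
            pvDot_map_add_left zs _ x (by simp [pvPrefixLoop_length, h])]
        simp only [zero_mul, zero_add] at hIH ⊢
        rw [hIH]; ring

theorem pvWrow_length (l : List Char) : (pvWrow l).length = l.length + 1 := by
  induction l with
  | nil => rfl
  | cons c t ih =>
    simp only [pvWrow, List.foldr_cons] at *
    by_cases hc : c = 'I' <;>
      simp [hc, pvPrefixLoop_length, ih]

-- the A-side step
def pvStepA (dp : List Int) (c : Char) : List Int :=
  if c = 'I' then pvPrefixLoop 0 (PySem.List.slice dp none (some (-1)))
  else pvSuffixLoop (PySem.List.slice dp (some 1) none)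

-- main invariant: head of A's run = ⟨B's row, start vector⟩
theorem pvMain (l : List Char) (v : List Int) (h : v.length = l.length + 1) :
    (l.foldl pvStepA v).headD 0 = pvDot (pvWrow l) v := by
  induction l generalizing v with
  | nil =>
    cases v with
    | nil => simp at h
    | cons y ys =>
      have : ys = [] := List.eq_nil_of_length_eq_zero (by simpa using h)
      subst this
      simp [pvWrow, pvDot]
  | cons c t ih =>
    have hlen : (pvStepA v c).length = t.length + 1 := by
      by_cases hc : c = 'I' <;>
        simp [pvStepA, hc, PySem.List.slice_to_neg_one, PySem.List.slice_from_one,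
              pvPrefixLoop_length, pvSuffixLoop_length, List.length_dropLast,
              List.length_tail, h]
    rw [List.foldl_cons, ih (pvStepA v c) hlen]
    have hwl : (pvWrow t).length + 1 = v.length := by rw [pvWrow_length, h]; simp
    by_cases hc : c = 'I'
    · have : pvWrow (c :: t) = pvSuffixLoop (pvWrow t) ++ [0] := by
        simp [pvWrow, hc, pvRevPref]
      rw [this, pvK1 (pvWrow t) v (by omega)]
      simp [pvStepA, hc, PySem.List.slice_to_neg_one]
    · have : pvWrow (c :: t) = 0 :: pvPrefixLoop 0 (pvWrow t) := by
        simp [pvWrow, hc]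
      rw [this, pvK2 (pvWrow t) v (by omega)]
      simp [pvStepA, hc, PySem.List.slice_from_one]

theorem pvFold_length : ∀ (l : List Char) (v : List Int), v.length = l.length + 1 →
    (l.foldl pvStepA v).length = 1
  | [], v, h => by simpa using h
  | c :: t, v, h => by
    rw [List.foldl_cons]
    apply pvFold_length t
    by_cases hc : c = 'I' <;>
      simp [pvStepA, hc, PySem.List.slice_to_neg_one, PySem.List.slice_from_one,
            pvPrefixLoop_length, pvSuffixLoop_length, List.length_dropLast,
            List.length_tail, h]

theorem pvDot_replicate_one (u : List Int) :
    pvDot u (List.replicate u.length 1) = u.sum := by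
  induction u with
  | nil => rfl
  | cons x xs ih => simp [pvDot, List.replicate_succ, ih]

-- B's inner accumulate-append loop computes (acc + sum l, out ++ prefix-sums)
theorem pvAccumLoop (l : List Int) (a : Int) (acc : List Int) :
    l.foldl (fun (p : Int × List Int) x => (p.1 + x, p.2 ++ [p.1 + x])) (a, acc)
      = (a + l.sum, acc ++ pvPrefixLoop a l) := by
  induction l generalizing a acc with
  | nil => simp [pvPrefixLoop]
  | cons x xs ih => simp [pvPrefixLoop, ih]; ring_nf

-- B's port equals sum of pvWrow, mod M
theorem pvAltStep_foldr (l : List Char) :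
    l.foldr (fun c r => pvAltStep r c) [1] = pvWrow l := by
  induction l with
  | nil => rfl
  | cons c t ih =>
    have hw : pvWrow (c :: t)
        = if c = 'I' then (pvPrefixLoop 0 (pvWrow t).reverse).reverse ++ [0]
          else 0 :: pvPrefixLoop 0 (pvWrow t) := rfl
    rw [List.foldr_cons, ih, hw]
    by_cases hc : c = 'I'
    · simp only [pvAltStep]
      rw [if_pos hc, if_pos hc, pvAccumLoop]
      simp
    · simp only [pvAltStep]
      rw [if_neg hc, if_neg hc, pvAccumLoop]
      simp

theorem pvAltEq (S : String) :
    numPermsDISequence_alt S = PySem.Int.mod (pvWrow S.toList).sum (10 ^ 9 + 7) := by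
  show PySem.Int.mod (S.toList.reverse.foldl pvAltStep [1]).sum (10 ^ 9 + 7) = _
  rw [List.foldl_reverse, pvAltStep_foldr]

-- head of the final (length-1) vector, read via pyGetD
theorem pvHead_eq (dp : List Int) (h : dp.length = 1) :
    PySem.List.pyGetD dp 0 0 = dp.headD 0 := by
  cases dp with
  | nil => simp at h
  | cons x xs => simp [PySem.List.pyGetD_zero_cons]

-- ===== VERDICT (by name: the statement is the Claim_ definition above) =====
theorem numPermsDISequence_spec : Claim_equal_numPermsDISequence := by
  intro S _
  show numPermsDISequence S = numPermsDISequence_alt S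
  rw [pvAltEq]
  show PySem.Int.mod
      (PySem.List.pyGetD (S.toList.foldl pvStepA (List.replicate (S.toList.length + 1) 1)) 0 0)
      (10 ^ 9 + 7) = _
  have hlen0 : (List.replicate (S.toList.length + 1) (1 : Int)).length = S.toList.length + 1 := by simp
  rw [pvHead_eq _ (pvFold_length S.toList _ hlen0),
      pvMain S.toList (List.replicate (S.toList.length + 1) 1) hlen0]
  rw [← pvWrow_length S.toList, pvDot_replicate_one]
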